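-- pv_equiv track=rewrite | github.com/mattroz/ACSCC | preprocessor.py | find_disjoint_paths
-- ===== SOURCE A (Python) =====
-- from itertools import combinations
--
-- def find_disjoint_paths(cycles):
-- 	# Generate all combinations through the number of cycles,
-- 	# e.g. pairs, threes, foursome etc.
-- 	# Works only with len(cycles >= 2)
-- 	combs = []
-- 	for i in range(2, len(cycles)+1):
-- 		combs.append(list(combinations(cycles,i)))
-- 	# Check all the combinations for intersection:
-- 	# if there is no intersection, add this combination to the result list
-- 	disjoint_paths = []
-- 	for outer_comb in combs:
-- 		for inner_comb in outer_comb: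
-- 			counter = 0
-- 			for i in range(len(inner_comb)):
-- 				for j in range(i+1, len(inner_comb)):
-- 					counter += 1 if len(set(inner_comb[i]) & set(inner_comb[j])) else 0
-- 			if counter == 0:
-- 				disjoint_paths.append(inner_comb)
-- 	return disjoint_paths
-- ===== SOURCE B (Python) =====
-- def _intersect(a, b):
--     bs = set(b)
--     return any(x in bs for x in a)
--
-- def _dfs(rest, chosen, results):
--     # extend-only backtracking: prune any branch whose new cycle meets a chosen one
--     if not rest:
--         return
--     c, tail = rest[0], rest[1:]
--     if all(not _intersect(p, c) for p in chosen):
--         nc = chosen + (c,)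
--         if len(nc) >= 2:
--             results.append(nc)
--         _dfs(tail, nc, results)
--     _dfs(tail, chosen, results)
--
-- def find_disjoint_paths(cycles):
--     results = []
--     _dfs(list(cycles), (), results)
--     # regroup by size (ascending), keeping DFS (lexicographic) order within a size
--     return [s for k in range(2, len(cycles) + 1) for s in results if len(s) == k]
-- ===== Notes on version B (the rewrite author's own statement) =====
-- stated objective: faster
-- what changed: A materialises every combination of every size and tests each for pairwise intersection with a quadratic inner loop; B does pruned backtracking that only extends subsets that are still pairwise disjoint (abandoning any branch whose new cycle meets a chosen one) and then regroups the collected subsets by size.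
import Mathlib
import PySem

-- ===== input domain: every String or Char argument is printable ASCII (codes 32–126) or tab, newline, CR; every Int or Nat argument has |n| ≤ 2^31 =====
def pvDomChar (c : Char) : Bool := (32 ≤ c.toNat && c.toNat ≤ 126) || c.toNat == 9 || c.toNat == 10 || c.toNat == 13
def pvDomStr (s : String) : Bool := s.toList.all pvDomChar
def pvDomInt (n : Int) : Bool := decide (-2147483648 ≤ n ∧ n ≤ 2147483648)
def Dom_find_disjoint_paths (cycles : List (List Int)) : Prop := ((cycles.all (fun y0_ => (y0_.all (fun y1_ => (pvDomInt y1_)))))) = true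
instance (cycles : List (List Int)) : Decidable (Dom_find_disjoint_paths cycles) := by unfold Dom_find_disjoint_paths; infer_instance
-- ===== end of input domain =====

-- B replaces A's generate-every-combination-then-test pass by pruned backtracking that only
-- extends currently pairwise-disjoint subsets, then regroups the results by size (faster).

-- ===== PORT A =====
-- truthiness of len(set(a) & set(b)): some element of a occurs in b
def pvInter (a b : List Int) : Bool := a.any (fun x => b.contains x)

-- itertools.combinations(l, k), in its lexicographic order
def pvCombs : List (List Int) → Nat → List (List (List Int))
  | _, 0 => [[]]
  | [], _ + 1 => []
  | x :: xs, k + 1 => (pvCombs xs k).map (fun c => x :: c) ++ pvCombs xs (k + 1)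

-- A's nested i<j loop: counter of intersecting pairs
def pvPairs : List (List Int) → Nat
  | [] => 0
  | x :: xs => xs.foldl (fun acc y => acc + if pvInter x y then 1 else 0) 0 + pvPairs xs

def find_disjoint_paths (cycles : List (List Int)) : List (List (List Int)) :=
  -- combs: one list of combinations per size i in range(2, len(cycles)+1)
  let combs := (List.range' 2 (cycles.length - 1)).map (fun k => pvCombs cycles k)
  -- for outer_comb in combs: for inner_comb in outer_comb: if counter == 0: append
  combs.foldl (fun acc oc =>
    oc.foldl (fun acc2 c => if pvPairs c == 0 then acc2 ++ [c] else acc2) acc) []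

-- ===== PORT B =====
-- _intersect(a, b): some element of a is in set(b)
def altInter (a b : List Int) : Bool := a.any (fun x => b.contains x)

-- _dfs(rest, chosen, results): pruned backtracking; results in DFS emission order
def altDfs : List (List Int) → List (List Int) → List (List (List Int))
  | [], _ => []
  | c :: tail, chosen =>
    (if chosen.all (fun p => !altInter p c) then
      (if 2 ≤ (chosen ++ [c]).length then [chosen ++ [c]] else []) ++ altDfs tail (chosen ++ [c])
     else []) ++ altDfs tail chosen

def find_disjoint_paths_alt (cycles : List (List Int)) : List (List (List Int)) :=
  let results := altDfs cycles []
  -- [s for k in range(2, len(cycles)+1) for s in results if len(s) == k]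
  (List.range' 2 (cycles.length - 1)).foldl
    (fun acc k => acc ++ results.filter (fun s => s.length == k)) []

-- ===== PRECONDITION & SPEC =====
def Spec_find_disjoint_paths (cycles : List (List Int)) (out : List (List (List Int))) : Prop := out = find_disjoint_paths_alt cycles
instance (cycles : List (List Int)) (out : List (List (List Int))) : Decidable (Spec_find_disjoint_paths cycles out) := by unfold Spec_find_disjoint_paths; infer_instance

-- ===== CLAIM (what is proved, stated in full; the proofs are below) =====
def Claim_equal_find_disjoint_paths : Prop := ∀ (cycles : List (List Int)), Dom_find_disjoint_paths cycles → Spec_find_disjoint_paths cycles (find_disjoint_paths cycles)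

-- ===== LEMMAS AND PROOFS =====

-- the dfs invariant: each new cycle must avoid everything already chosen
def extOK (chosen : List (List Int)) : List (List Int) → Bool
  | [] => true
  | x :: xs => chosen.all (fun p => !altInter p x) && extOK (chosen ++ [x]) xs

-- every result emitted by altDfs strictly extends `chosen`
theorem altDfs_length {tail chosen : List (List Int)} {s : List (List Int)}
    (h : s ∈ altDfs tail chosen) : chosen.length < s.length := by
  induction tail generalizing chosen with
  | nil => simp [altDfs] at h
  | cons c xs ih =>
    simp only [altDfs, List.mem_append] at h
    rcases h with h | h
    · split at h
      · rcases List.mem_append.mp h with h | h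
        · split at h
          · simp at h; subst h; simp
          · simp at h
        · have := ih h; simp at this; omega
      · simp at h
    · exact ih h

-- size-k slice of the dfs output = A's combinations of size k that pass the invariant
theorem filter_altDfs (tail : List (List Int)) : ∀ (chosen : List (List Int)) (k : Nat),
    2 ≤ chosen.length + (k + 1) →
    (altDfs tail chosen).filter (fun s => s.length == chosen.length + (k + 1))
      = ((pvCombs tail (k + 1)).filter (fun d => extOK chosen d)).map (fun d => chosen ++ d) := by
  induction tail with
  | nil => intro chosen k _; simp [altDfs, pvCombs]
  | cons c xs ih =>
    intro chosen k h2
    simp only [altDfs, pvCombs]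
    by_cases hd : chosen.all (fun p => !altInter p c)
    · rw [if_pos hd]
      simp only [List.filter_append, List.map_append]
      have hemit : (List.filter (fun s => s.length == chosen.length + (k + 1))
            (if 2 ≤ (chosen ++ [c]).length then [chosen ++ [c]] else []))
          = List.filter (fun s => s.length == chosen.length + (k + 1)) [chosen ++ [c]] := by
        by_cases hg : 2 ≤ (chosen ++ [c]).length
        · rw [if_pos hg]
        · rw [if_neg hg]
          have h0 : chosen = [] := by simpa using hg
          subst h0
          have hk : 1 ≤ k := by simpa using h2
          simp only [List.filter_nil]
          symm
          refine List.filter_eq_nil_iff.mpr ?_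
          intro a ha
          have ha' : a = [] ++ [c] := by simpa using ha
          subst ha'
          simp
          omega
      rw [hemit, ← ih chosen k h2]
      have hpart1 : List.filter (fun s => s.length == chosen.length + (k + 1)) [chosen ++ [c]]
            ++ (altDfs xs (chosen ++ [c])).filter (fun s => s.length == chosen.length + (k + 1))
          = ((List.map (fun d => c :: d) (pvCombs xs k)).filter
              (fun d => extOK chosen d)).map (fun d => chosen ++ d) := by
        rw [List.filter_map]
        have hext : ((fun d => extOK chosen d) ∘ fun d => c :: d)
            = fun d => extOK (chosen ++ [c]) d := by
          funext d; simp [Function.comp, extOK, hd]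
        rw [hext]
        cases k with
        | zero =>
          have hnil : (altDfs xs (chosen ++ [c])).filter
              (fun s => s.length == chosen.length + (0 + 1)) = [] := by
            refine List.filter_eq_nil_iff.mpr (fun s hs => ?_)
            have := altDfs_length hs
            simp at this ⊢
            omega
          rw [hnil]
          simp [pvCombs, extOK, List.filter]
        | succ j =>
          have htgt : (fun s : List (List Int) => s.length == chosen.length + (j + 1 + 1))
              = fun s => s.length == (chosen ++ [c]).length + (j + 1) := by
            funext s; simp; omega
          rw [htgt, ih (chosen ++ [c]) j (by simp; omega)]
          have hone : (List.filter (fun s => s.length == (chosen ++ [c]).length + (j + 1))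
              [chosen ++ [c]]) = [] := by simp
          rw [hone, List.nil_append, List.map_map]
          congr 1
          funext d
          simp [Function.comp]
      rw [← hpart1]
    · rw [if_neg hd]
      have hz : ∀ d, extOK chosen (c :: d) = false := fun d => by
        simp only [extOK, hd, Bool.false_and]
      simp only [List.filter_append, List.map_append]
      rw [List.filter_map]
      have hcz : ((fun d => extOK chosen d) ∘ fun d => c :: d) = fun _ => false := by
        funext d; simp [Function.comp, hz d]
      rw [hcz]
      simpa using ih chosen k h2

-- A's row counter is zero iff x meets nothing in xs (and the accumulator was zero)
theorem pvRow_zero (x : List Int) (xs : List (List Int)) :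
    ∀ n, (xs.foldl (fun acc y => acc + if pvInter x y then 1 else 0) n = 0
      ↔ n = 0 ∧ ∀ y ∈ xs, pvInter x y = false) := by
  induction xs with
  | nil => simp
  | cons y ys ih =>
    intro n
    simp only [List.foldl_cons, ih, List.mem_cons]
    constructor
    · rintro ⟨h1, h2⟩
      by_cases hy : pvInter x y
      · simp [hy] at h1
      · simp only [hy] at h1
        refine ⟨h1, fun z hz => ?_⟩
        rcases hz with rfl | hz
        · simpa using hy
        · exact h2 z hz
    · rintro ⟨rfl, h⟩
      have hy : pvInter x y = false := h y (Or.inl rfl)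
      exact ⟨by simp [hy], fun z hz => h z (Or.inr hz)⟩

theorem pvPairs_zero (d : List (List Int)) :
    pvPairs d = 0 ↔ List.Pairwise (fun a b => pvInter a b = false) d := by
  induction d with
  | nil => simp [pvPairs]
  | cons x xs ih =>
    simp only [pvPairs, List.pairwise_cons, Nat.add_eq_zero_iff, ih, pvRow_zero]
    tauto

-- the dfs invariant, characterised
theorem extOK_iff (d : List (List Int)) : ∀ pre, (extOK pre d = true ↔
    (∀ p ∈ pre, ∀ x ∈ d, altInter p x = false)
      ∧ List.Pairwise (fun a b => altInter a b = false) d) := by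
  induction d with
  | nil => intro pre; simp [extOK]
  | cons x xs ih =>
    intro pre
    have hstep : extOK pre (x :: xs)
        = (pre.all (fun p => !altInter p x) && extOK (pre ++ [x]) xs) := rfl
    rw [hstep, Bool.and_eq_true, ih (pre ++ [x]), List.pairwise_cons]
    simp only [List.all_eq_true, Bool.not_eq_eq_eq_not, Bool.not_true, List.mem_append,
      List.mem_cons, List.not_mem_nil, or_false]
    constructor
    · rintro ⟨h1, h2, h3⟩
      refine ⟨fun p hp z hz => ?_, fun z hz => h2 x (Or.inr rfl) z hz, h3⟩
      rcases hz with rfl | hz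
      · exact h1 p hp
      · exact h2 p (Or.inl hp) z hz
    · rintro ⟨h1, h2, h3⟩
      refine ⟨fun p hp => h1 p hp x (Or.inl rfl), fun p hp z hz => ?_, h3⟩
      rcases hp with hp | rfl
      · exact h1 p hp z (Or.inr hz)
      · exact h2 z hz

-- with nothing chosen yet, the dfs invariant is exactly A's pairwise-disjointness test
theorem extOK_nil (d : List (List Int)) : extOK [] d = (pvPairs d == 0) := by
  have h1 : extOK [] d = true ↔ pvPairs d = 0 := by
    rw [pvPairs_zero]
    simpa using extOK_iff d []
  cases hb : extOK [] d
  · rw [hb] at h1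
    have : pvPairs d ≠ 0 := fun h => by simp [h] at h1
    simp [this]
  · rw [hb] at h1
    simp [h1.mp rfl]

theorem find_disjoint_paths_eq (cycles : List (List Int)) :
    find_disjoint_paths cycles = find_disjoint_paths_alt cycles := by
  unfold find_disjoint_paths find_disjoint_paths_alt
  rw [List.foldl_map]
  refine PySem.List.foldl_congr_mem _ _ _ _ (fun acc k hk => ?_)
  have hk2 : 2 ≤ k := (List.mem_range'_1.mp hk).1
  have hfold : (pvCombs cycles k).foldl
      (fun acc2 c => if pvPairs c == 0 then acc2 ++ [c] else acc2) acc
      = acc ++ (pvCombs cycles k).filter (fun c => pvPairs c == 0) := by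
    simpa using PySem.List.foldl_append_if (fun c => pvPairs c == 0) id (pvCombs cycles k) acc
  rw [hfold]
  obtain ⟨j, rfl⟩ : ∃ j, k = j + 1 := ⟨k - 1, by omega⟩
  have htgt : (fun s : List (List Int) => s.length == j + 1)
      = fun s => s.length == ([] : List (List Int)).length + (j + 1) := by
    funext s; simp
  rw [htgt, filter_altDfs cycles [] j (by simpa using hk2)]
  have hP : List.filter (fun d => extOK [] d) (pvCombs cycles (j + 1))
      = List.filter (fun c => pvPairs c == 0) (pvCombs cycles (j + 1)) :=
    List.filter_congr (fun d _ => extOK_nil d)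
  simp [hP]

-- ===== VERDICT (by name: the statement is the Claim_ definition above) =====
theorem find_disjoint_paths_spec : Claim_equal_find_disjoint_paths := by
  intro cycles _
  exact find_disjoint_paths_eq cycles
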